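-- pv_equiv track=rewrite | github.com/ThomasCZhang/CMU-02604-Bioinformatics-Spring2023 | Week11 (Burrows Wheeler)/bwt_decode.py | get_ranks
-- ===== SOURCE A (Python) =====
-- def get_ranks(word: str) -> dict[str, int]:
--     """
--     Determines the rank of each character in word. The rank of a character is the number of times characters that are
--     "smaller" than that character appear in the word. A "smaller" character, is a character that occurs earlier
--     when ordered lexicographically.
--     Input:
--         word: the word being analyzed.
--     Output:
--         The rank of each unique character in word stored in a dictionary.
--     """
--     letter_counts = count_letters(word)
--     sorted_chars = sorted(letter_counts.keys())
--     rank = {}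
--     total = 0
--     for char in sorted_chars:
--         rank[char] = total
--         total += letter_counts[char]
--     return rank
--
-- def count_letters(word: str) -> dict[str, int]:
--     """
--     Counts the number of times a character occurs in word.
--     Input:
--         word: the word being analyzed.
--     Output:
--         A dictionary were the key is the character being analyzed, and the value is the number of times that letter
--         occurs in word.
--     """
--     count_dict = {}
--     for character in word:
--         if character in count_dict:
--             count_dict[character] += 1
--         else:
--             count_dict[character] = 1
--     return count_dict
-- ===== SOURCE B (Python) =====
-- def get_ranks(word: str) -> dict[str, int]:
--     rank = {}
--     for i, char in enumerate(sorted(word)):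
--         if char not in rank:
--             rank[char] = i
--     return rank
-- ===== Notes on version B (the rewrite author's own statement) =====
-- stated objective: simpler
-- what changed: B drops the count table and the running cumulative total: it sorts the whole word and records each character's first index in the sorted sequence (which equals the number of strictly smaller characters), one enumerate loop instead of two dict-building passes.
import Mathlib
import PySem

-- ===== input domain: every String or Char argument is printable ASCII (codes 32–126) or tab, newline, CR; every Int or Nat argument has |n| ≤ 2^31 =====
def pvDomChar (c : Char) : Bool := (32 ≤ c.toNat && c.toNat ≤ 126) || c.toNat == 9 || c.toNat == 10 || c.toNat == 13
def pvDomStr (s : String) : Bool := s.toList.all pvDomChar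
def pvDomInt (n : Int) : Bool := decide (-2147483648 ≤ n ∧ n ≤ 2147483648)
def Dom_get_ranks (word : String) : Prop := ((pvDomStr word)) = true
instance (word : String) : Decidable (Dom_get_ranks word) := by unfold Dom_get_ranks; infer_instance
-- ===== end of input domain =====

-- B replaces A's count-table + cumulative-total passes by one scan of the fully sorted word that
-- records each character's first sorted index (simpler; same return value everywhere).

-- ===== PORT A =====
-- helper count_letters: character-occurrence dictionary (chars as 1-char strings, as in Python)
def countLetters (word : String) : PySem.Dict String Int :=
  (word.toList.map String.singleton).foldl
    (fun d c => if d.contains c then d.modify c 0 (· + 1) else d.insert c 1)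
    PySem.Dict.empty

def get_ranks (word : String) : List (String × Int) :=
  let letterCounts := countLetters word
  let sortedChars := PySem.List.sorted letterCounts.keys (fun x => x) false
  (sortedChars.foldl
    (fun (st : PySem.Dict String Int × Int) c => (st.1.insert c st.2, st.2 + letterCounts.getD c 0))
    (PySem.Dict.empty, 0)).1.items

-- ===== PORT B =====
def get_ranks_alt (word : String) : List (String × Int) :=
  ((PySem.List.enumerate (PySem.List.sorted (word.toList.map String.singleton) (fun x => x) false) 0).foldl
    (fun d p => if d.contains p.2 then d else d.insert p.2 p.1)
    PySem.Dict.empty).items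

-- ===== PRECONDITION & SPEC =====
def Spec_get_ranks (word : String) (out : List (String × Int)) : Prop := out = get_ranks_alt word
instance (word : String) (out : List (String × Int)) : Decidable (Spec_get_ranks word out) := by unfold Spec_get_ranks; infer_instance

-- ===== CLAIM (what is proved, stated in full; the proofs are below) =====
def Claim_equal_get_ranks : Prop := ∀ (word : String), Dom_get_ranks word → Spec_get_ranks word (get_ranks word)

-- ===== LEMMAS AND PROOFS =====

-- A's count_letters loop is Counter(word) (the absent-key branch is exactly modify with default 0)
theorem countLetters_eq (word : String) :
    countLetters word = PySem.Dict.counter (word.toList.map String.singleton) := by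
  unfold countLetters
  rw [PySem.Dict.counter_eq_foldl]
  apply PySem.List.foldl_congr_mem
  intro acc x _
  by_cases h : acc.contains x = true
  · simp [h]
  · simp only [Bool.not_eq_true] at h
    simp [h, PySem.Dict.modify, PySem.Dict.getD_of_not_contains acc 0 h]

theorem ofList_sublist {α : Type} [BEq α] [LawfulBEq α] (l : List α) :
    (PySem.Set.ofList l).Sublist l := by
  induction l with
  | nil => simp [PySem.Set.ofList]
  | cons x xs ih =>
      rw [PySem.Set.ofList_cons]
      exact List.Sublist.cons₂ x (List.filter_sublist.trans ih)

theorem pairwise_lt_ofList_sorted (w : List String) :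
    (PySem.Set.ofList (PySem.List.sorted w (fun x => x) false)).Pairwise (· < ·) := by
  have hle : (PySem.Set.ofList (PySem.List.sorted w (fun x => x) false)).Pairwise (· ≤ ·) :=
    (PySem.List.sorted_pairwise w (fun x => x)).sublist (ofList_sublist _)
  have hnd : (PySem.Set.ofList (PySem.List.sorted w (fun x => x) false)).Nodup :=
    PySem.Set.nodup_ofList _
  exact (hle.and hnd).imp (fun h => lt_of_le_of_ne h.1 h.2)

-- sorting the distinct characters = deduplicating the sorted characters
theorem sorted_ofList_eq (w : List String) :
    PySem.List.sorted (PySem.Set.ofList w) (fun x => x) false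
      = PySem.Set.ofList (PySem.List.sorted w (fun x => x) false) := by
  apply PySem.List.sorted_eq_of_perm_of_pairwise_lt
  · refine (List.perm_ext_iff_of_nodup (PySem.Set.nodup_ofList _) (PySem.Set.nodup_ofList _)).mpr ?_
    intro x
    simp only [PySem.Set.mem_ofList]
    exact ⟨fun h => (PySem.List.sorted_perm w (fun x => x) false).subset h,
           fun h => ((PySem.List.sorted_perm w (fun x => x) false).symm).subset h⟩
  · exact pairwise_lt_ofList_sorted w

-- the (char, running total) pairs A's final loop produces
def ranksFrom (g : String → Int) : List String → Int → List (String × Int)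
  | [], _ => []
  | c :: ks, t => (c, t) :: ranksFrom g ks (t + g c)

theorem foldA_items (g : String → Int) (ks : List String) :
    ∀ (d : PySem.Dict String Int) (t : Int), (d.keys ++ ks).Nodup →
      ((ks.foldl (fun (st : PySem.Dict String Int × Int) c => (st.1.insert c st.2, st.2 + g c)) (d, t)).1).items
        = d.items ++ ranksFrom g ks t := by
  induction ks with
  | nil => intro d t _; simp [ranksFrom]
  | cons c ks ih =>
      intro d t hnd
      have hcd : c ∉ d.keys := fun hc =>
        (List.disjoint_of_nodup_append hnd) hc (by simp)
      have hcon : d.contains c = false := by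
        rw [PySem.Dict.contains_eq_decide_mem_keys]
        simpa using hcd
      have hnd' : ((d.insert c t).keys ++ ks).Nodup := by
        rw [PySem.Dict.keys_insert_of_not_contains d t hcon, List.append_assoc]
        simpa using hnd
      simp only [List.foldl_cons]
      rw [ih (d.insert c t) (t + g c) hnd',
          PySem.Dict.items_insert_of_not_contains d t hcon]
      simp [ranksFrom]

theorem ranksFrom_congr (g g' : String → Int) (ks : List String) (t : Int)
    (h : ∀ c ∈ ks, g c = g' c) : ranksFrom g ks t = ranksFrom g' ks t := by
  induction ks generalizing t with
  | nil => rfl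
  | cons c ks ih =>
      simp only [ranksFrom, h c (by simp)]
      exact congrArg _ (ih _ (fun c' hc' => h c' (by simp [hc'])))

-- cumulative totals over the sorted distinct characters = strictly-smaller counts
theorem ranksFrom_spec (ks : List String) :
    ∀ (l : List String) (t : Int), ks.Pairwise (· < ·) → (∀ x, x ∈ l ↔ x ∈ ks) →
      ranksFrom (fun c => (l.count c : Int)) ks t
        = ks.map (fun c => (c, t + (l.countP (fun x => decide (x < c)) : Int))) := by
  induction ks with
  | nil => intro l t _ _; rfl
  | cons c ks ih =>
      intro l t hpw hmem
      have hclt : ∀ x ∈ ks, c < x := fun x hx => (List.pairwise_cons.mp hpw).1 x hx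
      have h0 : l.countP (fun x => decide (x < c)) = 0 := by
        rw [List.countP_eq_zero]
        intro a ha
        rcases List.mem_cons.mp ((hmem a).mp ha) with h | h
        · subst h; simp only [decide_eq_true_eq]; exact lt_irrefl a
        · simp only [decide_eq_true_eq]; exact not_lt.mpr (le_of_lt (hclt a h))
      have hfil : ∀ c' ∈ ks, (fun c'' => (l.count c'' : Int)) c'
          = (fun c'' => ((l.filter (fun x => !(x == c))).count c'' : Int)) c' := by
        intro c' hc'
        have hb : (!(c' == c)) = true := by simp [ne_of_gt (hclt c' hc')]
        simp only
        rw [List.count_filter (p := fun x => !(x == c)) hb]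
      have hmem' : ∀ x, x ∈ l.filter (fun y => !(y == c)) ↔ x ∈ ks := by
        intro x
        simp only [List.mem_filter, hmem x, List.mem_cons, Bool.not_eq_eq_eq_not,
          Bool.not_true, beq_eq_false_iff_ne, ne_eq]
        constructor
        · rintro ⟨h | h, hne⟩
          · exact absurd h hne
          · exact h
        · intro h; exact ⟨Or.inr h, ne_of_gt (hclt x h)⟩
      simp only [ranksFrom, List.map_cons, h0]
      refine congrArg₂ List.cons (by simp) ?_
      rw [ranksFrom_congr _ (fun c'' => ((l.filter (fun x => !(x == c))).count c'' : Int)) ks _ hfil,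
          ih (l.filter (fun y => !(y == c))) (t + l.count c) (List.pairwise_cons.mp hpw).2 hmem']
      apply List.map_congr_left
      intro c' hc'
      have hsplit := List.countP_eq_countP_filter_add l (fun x => decide (x < c')) (fun x => x == c)
      have hcnt : (l.filter (fun x => x == c)).countP (fun x => decide (x < c')) = l.count c := by
        rw [List.countP_eq_length.mpr, ← List.countP_eq_length_filter]
        · rfl
        · intro a ha
          have ha' : a = c := by simpa using (List.mem_filter.mp ha).2
          exact ha' ▸ decide_eq_true (hclt c' hc')
      refine Prod.ext rfl ?_
      simp only [hsplit, hcnt]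
      push_cast
      ring

-- B's scan over the enumerated sorted list records first indices = strictly-smaller counts
theorem foldB_items (l : List String) (hpw : l.Pairwise (· ≤ ·)) :
    ((PySem.List.enumerate l 0).foldl
        (fun (d : PySem.Dict String Int) p => if d.contains p.2 then d else d.insert p.2 p.1)
        PySem.Dict.empty).items
      = (PySem.Set.ofList l).map (fun c => (c, (l.countP (fun x => decide (x < c)) : Int))) := by
  induction l using List.reverseRecOn with
  | nil => rfl
  | append_singleton m x ih =>
      have hpm : m.Pairwise (· ≤ ·) := (List.pairwise_append.mp hpw).1
      have hmx : ∀ a ∈ m, a ≤ x := fun a ha =>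
        (List.pairwise_append.mp hpw).2.2 a ha x (by simp)
      rw [PySem.List.enumerate_append, List.foldl_append]
      set f := fun (d : PySem.Dict String Int) (p : Int × String) =>
        if d.contains p.2 then d else d.insert p.2 p.1 with hf
      set dB := (PySem.List.enumerate m 0).foldl f PySem.Dict.empty with hdB
      have hitems : dB.items
          = (PySem.Set.ofList m).map (fun c => (c, (m.countP (fun y => decide (y < c)) : Int))) := ih hpm
      have hkeys : dB.keys = PySem.Set.ofList m := by
        show dB.items.map (·.1) = _
        rw [hitems, List.map_map]
        exact List.map_id'' (fun _ => rfl) _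
      have hcon : dB.contains x = decide (x ∈ m) := by
        rw [PySem.Dict.contains_eq_decide_mem_keys, hkeys]
        simp [PySem.Set.mem_ofList]
      have hcongr : ∀ c, c ∈ PySem.Set.ofList m →
          ((m ++ [x]).countP (fun y => decide (y < c)) : Int) = (m.countP (fun y => decide (y < c)) : Int) := by
        intro c hc
        have hc' : c ∈ m := (PySem.Set.mem_ofList m c).mp hc
        have hxc : decide (x < c) = false := decide_eq_false (not_lt.mpr (hmx c hc'))
        rw [List.countP_append]
        simp only [List.countP_cons, List.countP_nil, hxc]
        simp
      by_cases hx : x ∈ m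
      · simp only [PySem.List.enumerate_cons, PySem.List.enumerate_nil, List.foldl_cons, List.foldl_nil,
          hf, hcon, hx, decide_true, if_true]
        rw [hitems, PySem.Set.ofList_append_singleton,
            PySem.Set.add_of_mem ((PySem.Set.mem_ofList m x).mpr hx)]
        apply List.map_congr_left
        intro c hc
        exact Prod.ext rfl (hcongr c hc).symm
      · simp only [PySem.List.enumerate_cons, PySem.List.enumerate_nil, List.foldl_cons, List.foldl_nil,
          hf, hcon, hx, decide_false, Bool.false_eq_true, if_false]
        rw [PySem.Dict.items_insert_of_not_contains _ _ (by rw [hcon]; simp [hx]), hitems,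
            PySem.Set.ofList_append_singleton,
            PySem.Set.add_of_not_mem (fun h => hx ((PySem.Set.mem_ofList m x).mp h)), List.map_append]
        refine congrArg₂ _ ?_ ?_
        · apply List.map_congr_left
          intro c hc
          exact Prod.ext rfl (hcongr c hc).symm
        · have hmlt : m.countP (fun y => decide (y < x)) = m.length := by
            rw [List.countP_eq_length]
            intro a ha
            have hne : a ≠ x := fun h => hx (h ▸ ha)
            exact decide_eq_true (lt_of_le_of_ne (hmx a ha) hne)
          have hall : (m ++ [x]).countP (fun y => decide (y < x)) = m.length := by
            rw [List.countP_append]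
            simp only [List.countP_cons, List.countP_nil, decide_eq_false (lt_irrefl x)]
            simpa using hmlt
          simp only [List.map_cons, List.map_nil]
          rw [hall]
          norm_num

-- ===== VERDICT (by name: the statement is the Claim_ definition above) =====
theorem get_ranks_spec : Claim_equal_get_ranks := by
  unfold Claim_equal_get_ranks
  intro word _
  unfold Spec_get_ranks get_ranks get_ranks_alt
  simp only [countLetters_eq]
  set w := word.toList.map String.singleton with hw
  set l := PySem.List.sorted w (fun x => x) false with hl
  have hperm : l.Perm w := PySem.List.sorted_perm w (fun x => x) false
  rw [PySem.Dict.keys_counter, sorted_ofList_eq,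
      foldA_items _ _ PySem.Dict.empty 0 (by simp),
      ranksFrom_congr _ (fun c => (l.count c : Int)) _ 0
        (fun c _ => by simp only [PySem.Dict.getD_counter]; exact_mod_cast (hperm.count_eq c).symm),
      ranksFrom_spec (PySem.Set.ofList l) l 0 (pairwise_lt_ofList_sorted w)
        (fun x => (PySem.Set.mem_ofList l x).symm),
      foldB_items l (PySem.List.sorted_pairwise w (fun x => x))]
  have he : (PySem.Dict.empty : PySem.Dict String Int).items = [] := rfl
  rw [he]
  simp
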